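-- pv_equiv track=rewrite | github.com/oss-esso/OQI-UC002-DWave | @todo/hierarchical_quantum_solver.py | decompose_multilevel
-- ===== SOURCE A (Python) =====
-- from typing import Dict, List, Tuple, Set, Optional, Any
--
-- def decompose_multilevel(farm_names: List[str], farms_per_cluster: int = 10) -> List[List[str]]:
--     """
--     Multilevel decomposition: hierarchical grouping.
--
--     Creates balanced clusters using recursive bisection.
--     """
--     n_farms = len(farm_names)
--
--     if n_farms <= farms_per_cluster:
--         return [farm_names]
--
--     # Bisect
--     mid = n_farms // 2
--     left = farm_names[:mid]
--     right = farm_names[mid:]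
--
--     # Recursively decompose
--     left_clusters = decompose_multilevel(left, farms_per_cluster)
--     right_clusters = decompose_multilevel(right, farms_per_cluster)
--
--     return left_clusters + right_clusters
-- ===== SOURCE B (Python) =====
-- from typing import List
--
-- def decompose_multilevel(farm_names: List[str], farms_per_cluster: int = 10) -> List[List[str]]:
--     """Same clusters as recursive bisection: boundaries are computed on sizes
--     only, then the list is sliced once in a single pass."""
--     def sizes(n: int) -> List[int]:
--         if n <= farms_per_cluster:
--             return [n]
--         mid = n // 2
--         return sizes(mid) + sizes(n - mid)
--     out = []
--     i = 0
--     for s in sizes(len(farm_names)):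
--         out.append(farm_names[i:i + s])
--         i += s
--     return out
-- ===== Notes on version B (the rewrite author's own statement) =====
-- stated objective: alternative
-- what changed: Instead of recursively slicing the list at every bisection level, B computes the cluster sizes by recursion on the length alone and then slices the list once in a single left-to-right pass.
import Mathlib
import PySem

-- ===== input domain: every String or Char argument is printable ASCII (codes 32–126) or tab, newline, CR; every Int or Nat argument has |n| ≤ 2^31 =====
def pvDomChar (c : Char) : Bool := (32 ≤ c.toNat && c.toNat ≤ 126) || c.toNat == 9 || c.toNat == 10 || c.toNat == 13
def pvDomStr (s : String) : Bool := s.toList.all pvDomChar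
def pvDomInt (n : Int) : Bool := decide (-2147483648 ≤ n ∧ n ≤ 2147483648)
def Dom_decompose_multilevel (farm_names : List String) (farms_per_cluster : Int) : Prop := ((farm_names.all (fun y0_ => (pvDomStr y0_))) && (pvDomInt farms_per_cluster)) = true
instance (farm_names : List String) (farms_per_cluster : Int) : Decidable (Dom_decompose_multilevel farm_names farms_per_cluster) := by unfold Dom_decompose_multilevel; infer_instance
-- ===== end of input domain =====

-- B computes the bisection sizes on the length alone and slices the list once in a single pass (alternative algorithm, same cost).

-- ===== PORT A =====
-- Recursive bisection, slicing the list at every level.  The second branch is a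
-- totality guard only: Python's recursion does not terminate there (those inputs are excluded by Pre_).
def decompose_multilevel (farm_names : List String) (farms_per_cluster : Int) : List (List String) :=
  if ((farm_names.length : Int)) ≤ farms_per_cluster then [farm_names]
  else if farm_names.length ≤ 1 then [farm_names]
  else
    decompose_multilevel (PySem.List.slice farm_names none (some (PySem.Int.floordiv (farm_names.length : Int) 2))) farms_per_cluster ++
    decompose_multilevel (PySem.List.slice farm_names (some (PySem.Int.floordiv (farm_names.length : Int) 2)) none) farms_per_cluster
termination_by farm_names.length
decreasing_by
  · have h2 : PySem.Int.floordiv (farm_names.length : Int) 2 = ((farm_names.length / 2 : Nat) : Int) :=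
      by exact_mod_cast PySem.Int.floordiv_natCast farm_names.length 2
    rw [h2, PySem.List.slice_to_natCast]
    simp only [List.length_take]
    omega
  · have h2 : PySem.Int.floordiv (farm_names.length : Int) 2 = ((farm_names.length / 2 : Nat) : Int) :=
      by exact_mod_cast PySem.Int.floordiv_natCast farm_names.length 2
    rw [h2, PySem.List.slice_from_natCast]
    simp only [List.length_drop]
    omega

-- ===== PORT B =====
-- sizes(n): the cluster sizes of recursive bisection, computed on integers only.
-- The second branch is a totality guard: Python's recursion does not terminate there (excluded by Pre_).
def pvSizes (n farms_per_cluster : Int) : List Int :=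
  if n ≤ farms_per_cluster then [n]
  else if n ≤ 1 then [n]
  else
    pvSizes (PySem.Int.floordiv n 2) farms_per_cluster ++
    pvSizes (n - PySem.Int.floordiv n 2) farms_per_cluster
termination_by n.toNat
decreasing_by
  · have h2 : PySem.Int.floordiv n 2 = n / 2 := PySem.Int.floordiv_eq_ediv_of_pos (by omega)
    omega
  · have h2 : PySem.Int.floordiv n 2 = n / 2 := PySem.Int.floordiv_eq_ediv_of_pos (by omega)
    omega

-- the single slicing pass: for s in sizes: out.append(xs[i:i+s]); i += s
def pvChop (xs : List String) (i : Int) (ss : List Int) (acc : List (List String)) : List (List String) :=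
  match ss with
  | [] => acc
  | s :: rest => pvChop xs (i + s) rest (acc ++ [PySem.List.slice xs (some i) (some (i + s))])

def decompose_multilevel_alt (farm_names : List String) (farms_per_cluster : Int) : List (List String) :=
  pvChop farm_names 0 (pvSizes (farm_names.length : Int) farms_per_cluster) []

-- ===== PRECONDITION & SPEC =====
-- Pre_ excludes exactly the inputs on which A's recursion never terminates (farms_per_cluster < 1
-- with a list longer than farms_per_cluster): Python A (and B) hit infinite recursion there.
def Pre_decompose_multilevel (farm_names : List String) (farms_per_cluster : Int) : Prop :=
  1 ≤ farms_per_cluster ∨ (farm_names.length : Int) ≤ farms_per_cluster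
instance (farm_names : List String) (farms_per_cluster : Int) : Decidable (Pre_decompose_multilevel farm_names farms_per_cluster) := by unfold Pre_decompose_multilevel; infer_instance

def pvWitness_decompose_multilevel : List String × Int := (["a", "b", "c"], 2)

def Spec_decompose_multilevel (farm_names : List String) (farms_per_cluster : Int) (out : List (List String)) : Prop := out = decompose_multilevel_alt farm_names farms_per_cluster
instance (farm_names : List String) (farms_per_cluster : Int) (out : List (List String)) : Decidable (Spec_decompose_multilevel farm_names farms_per_cluster out) := by unfold Spec_decompose_multilevel; infer_instance

-- ===== CLAIM (what is proved, stated in full; the proofs are below) =====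
def Claim_equal_decompose_multilevel : Prop := ∀ (farm_names : List String) (farms_per_cluster : Int), Dom_decompose_multilevel farm_names farms_per_cluster → Pre_decompose_multilevel farm_names farms_per_cluster → Spec_decompose_multilevel farm_names farms_per_cluster (decompose_multilevel farm_names farms_per_cluster)

-- ===== LEMMAS AND PROOFS =====

-- reference form of the slicing pass: consume sizes from the front of the list
def pvChopT (xs : List String) (ss : List Int) : List (List String) :=
  match ss with
  | [] => []
  | s :: rest => xs.take s.toNat :: pvChopT (xs.drop s.toNat) rest

theorem pvChop_eq_chopT (ss : List Int) (xs : List String) (i : Int) (acc : List (List String))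
    (hi : 0 ≤ i) (hs : ∀ s ∈ ss, 0 ≤ s) :
    pvChop xs i ss acc = acc ++ pvChopT (xs.drop i.toNat) ss := by
  induction ss generalizing i acc with
  | nil => simp [pvChop, pvChopT]
  | cons s rest ih =>
    have hs0 : 0 ≤ s := hs s (by simp)
    rw [pvChop, ih (i + s) _ (by omega) (fun t ht => hs t (by simp [ht]))]
    rw [pvChopT]
    have hslice : PySem.List.slice xs (some i) (some (i + s)) =
        (xs.drop i.toNat).take s.toNat := by
      rw [PySem.List.slice_toNat xs hi (by omega)]
      congr 1
      omega
    have hdrop : (xs.drop i.toNat).drop s.toNat = xs.drop (i + s).toNat := by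
      rw [List.drop_drop]
      congr 1
      omega
    rw [hslice, hdrop]
    simp

theorem pvSizes_nonneg (n fpc : Int) (hn : 0 ≤ n) : ∀ s ∈ pvSizes n fpc, 0 ≤ s := by
  fun_induction pvSizes n fpc with
  | case1 n h => intro s hs; simp at hs; omega
  | case2 n h h1 => intro s hs; simp at hs; omega
  | case3 n h h1 ih1 ih2 =>
    have h2 : PySem.Int.floordiv n 2 = n / 2 := PySem.Int.floordiv_eq_ediv_of_pos (by omega)
    intro s hs
    rw [List.mem_append] at hs
    rcases hs with hs | hs
    · exact ih1 (by omega) s hs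
    · exact ih2 (by omega) s hs

theorem pvSizes_sumToNat (n fpc : Int) (hn : 0 ≤ n) :
    ((pvSizes n fpc).map Int.toNat).sum = n.toNat := by
  fun_induction pvSizes n fpc with
  | case1 n h => simp
  | case2 n h h1 => simp
  | case3 n h h1 ih1 ih2 =>
    have h2 : PySem.Int.floordiv n 2 = n / 2 := PySem.Int.floordiv_eq_ediv_of_pos (by omega)
    rw [List.map_append, List.sum_append, ih1 (by omega), ih2 (by omega)]
    omega

theorem pvChopT_append (ss₁ ss₂ : List Int) (xs ys : List String)
    (h : ((ss₁.map Int.toNat).sum) = xs.length) :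
    pvChopT (xs ++ ys) (ss₁ ++ ss₂) = pvChopT xs ss₁ ++ pvChopT ys ss₂ := by
  induction ss₁ generalizing xs with
  | nil =>
    simp at h
    have : xs = [] := List.eq_nil_of_length_eq_zero h.symm
    simp [this, pvChopT]
  | cons s rest ih =>
    simp only [List.map_cons, List.sum_cons] at h
    have hle : s.toNat ≤ xs.length := by omega
    rw [List.cons_append, pvChopT, pvChopT]
    rw [List.take_append_of_le_length hle, List.drop_append_of_le_length hle]
    rw [ih _ (by rw [List.length_drop]; omega)]
    simp

theorem decompose_eq_chopT (farm_names : List String) (farms_per_cluster : Int)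
    (hpre : Pre_decompose_multilevel farm_names farms_per_cluster) :
    decompose_multilevel farm_names farms_per_cluster =
      pvChopT farm_names (pvSizes (farm_names.length : Int) farms_per_cluster) := by
  fun_induction decompose_multilevel farm_names farms_per_cluster with
  | case1 xs h =>
    rw [pvSizes]
    simp only [h, if_pos]
    simp [pvChopT]
  | case2 xs h h1 =>
    -- unreachable under Pre_: ¬(len ≤ farms_per_cluster) forces 1 ≤ farms_per_cluster, hence len ≥ 2, contradicting len ≤ 1
    rcases hpre with hf | hf
    · omega
    · omega
  | case3 xs h h1 ih1 ih2 =>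
    have hf : 1 ≤ farms_per_cluster := by rcases hpre with hf | hf <;> omega
    have hmid : PySem.Int.floordiv (xs.length : Int) 2 = ((xs.length / 2 : Nat) : Int) := by
      exact_mod_cast PySem.Int.floordiv_natCast xs.length 2
    have hlen2 : 2 ≤ xs.length := by omega
    -- the two slices are take / drop of the midpoint
    have hsl : PySem.List.slice xs none (some (PySem.Int.floordiv (xs.length : Int) 2)) =
        xs.take (xs.length / 2) := by rw [hmid, PySem.List.slice_to_natCast]
    have hsr : PySem.List.slice xs (some (PySem.Int.floordiv (xs.length : Int) 2)) none =
        xs.drop (xs.length / 2) := by rw [hmid, PySem.List.slice_from_natCast]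
    have hltake : (xs.take (xs.length / 2)).length = xs.length / 2 := by
      simp [List.length_take]; omega
    have hldrop : (xs.drop (xs.length / 2)).length = xs.length - xs.length / 2 :=
      List.length_drop ..
    rw [hsl] at ih1
    rw [hsr] at ih2
    have ihl := ih1 (Or.inl hf)
    have ihr := ih2 (Or.inl hf)
    rw [hsl, hsr, ihl, ihr, hltake, hldrop]
    have hc1 : ¬ ((xs.length : Int) ≤ farms_per_cluster) := h
    have hc2 : ¬ ((xs.length : Int) ≤ 1) := by omega
    have hsplit : pvSizes ((xs.length : Int)) farms_per_cluster =
        pvSizes ((xs.length / 2 : Nat) : Int) farms_per_cluster ++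
        pvSizes ((xs.length - xs.length / 2 : Nat) : Int) farms_per_cluster := by
      rw [pvSizes, if_neg hc1, if_neg hc2, hmid]
      congr 1
      congr 1
      omega
    rw [hsplit]
    have hsum : (((pvSizes ((xs.length / 2 : Nat) : Int) farms_per_cluster).map Int.toNat).sum) =
        (xs.take (xs.length / 2)).length := by
      rw [pvSizes_sumToNat _ _ (by omega), hltake]
      omega
    rw [← List.take_append_drop (xs.length / 2) xs]
    rw [pvChopT_append _ _ _ _ (by rw [List.take_append_drop]; exact hsum)]
    simp

-- ===== VERDICT (by name: the statement is the Claim_ definition above) =====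
theorem decompose_multilevel_spec : Claim_equal_decompose_multilevel := by
  intro farm_names farms_per_cluster _hdom hpre
  unfold Spec_decompose_multilevel decompose_multilevel_alt
  rw [decompose_eq_chopT farm_names farms_per_cluster hpre]
  rw [pvChop_eq_chopT _ _ _ _ le_rfl (pvSizes_nonneg _ _ (by omega))]
  simp
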